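-- pv_equiv track=rewrite | github.com/GIS-DHSIT/DocWain | src/docwain_intel/response_assembler.py | _render_entity_bullets
-- ===== SOURCE A (Python) =====
-- from collections import defaultdict
-- from typing import Any, Dict, List, Optional
--
-- def _render_entity_bullets(facts: List[Dict[str, Any]]) -> str:
--     """Render facts as bullet list grouped by subject."""
--     by_subject: Dict[str, List[Dict[str, Any]]] = defaultdict(list)
--     for f in facts:
--         by_subject[f.get("subject", "Unknown")].append(f)
--
--     lines: list[str] = []
--     for subject, group in by_subject.items():
--         if len(by_subject) > 1:
--             lines.append(f"**{subject}**")
--         for f in group: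
--             predicate = _humanize_predicate(f.get("predicate", ""))
--             value = f.get("value", "")
--             lines.append(f"- **{predicate}**: {value}")
--         if len(by_subject) > 1:
--             lines.append("")  # blank line between subjects
--
--     return "\n".join(lines).rstrip()
--
-- def _humanize_predicate(predicate: str) -> str:
--     """Convert predicate keys like HAS_SKILL to Title Case."""
--     return predicate.replace("_", " ").title()
-- ===== SOURCE B (Python) =====
-- def _render_entity_bullets(facts):
--     """Render facts as bullet list grouped by subject (no dict: distinct subjects then per-subject filter scans)."""
--     subjects = []
--     for f in facts:
--         s = f.get("subject", "Unknown")
--         if s not in subjects: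
--             subjects.append(s)
--     multi = len(subjects) > 1
--     blocks = []
--     for s in subjects:
--         lines = ["**%s**" % s] if multi else []
--         for f in facts:
--             if f.get("subject", "Unknown") == s:
--                 predicate = f.get("predicate", "").replace("_", " ").title()
--                 lines.append("- **%s**: %s" % (predicate, f.get("value", "")))
--         blocks.append("\n".join(lines))
--     return ("\n\n" if multi else "\n").join(blocks).rstrip()
-- ===== Notes on version B (the rewrite author's own statement) =====
-- stated objective: alternative
-- what changed: B uses no dict at all: it collects the distinct subjects in first-seen order, then for each subject re-scans the facts list to filter its bullets into one block string, and joins the blocks ('\n\n' when several subjects, '\n' otherwise) before rstrip, replacing A's single-pass defaultdict grouping and flat line list with empty-string separators.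
import Mathlib
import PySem

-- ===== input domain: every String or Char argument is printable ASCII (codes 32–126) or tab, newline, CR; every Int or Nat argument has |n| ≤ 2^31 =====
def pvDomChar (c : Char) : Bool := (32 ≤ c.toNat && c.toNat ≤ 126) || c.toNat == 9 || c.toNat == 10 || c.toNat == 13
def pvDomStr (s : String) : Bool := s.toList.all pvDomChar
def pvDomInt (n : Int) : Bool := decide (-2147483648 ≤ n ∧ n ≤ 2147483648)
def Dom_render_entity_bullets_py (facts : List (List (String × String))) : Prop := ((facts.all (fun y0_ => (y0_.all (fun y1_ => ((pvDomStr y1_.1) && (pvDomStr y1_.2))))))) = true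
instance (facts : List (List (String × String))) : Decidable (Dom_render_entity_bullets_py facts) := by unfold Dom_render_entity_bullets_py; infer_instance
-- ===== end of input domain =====

-- B drops the dict entirely: it lists distinct subjects in first-seen order, re-scans the facts to filter each
-- subject's bullets into one block string, and joins the blocks; same return value (objective: alternative).

-- Python f.get(k, d) on an assoc-list dict: first match, else the default (both Pythons call .get).
def pvGetStr (f : List (String × String)) (k d : String) : String :=
  ((f.find? (fun p => p.1 == k)).map Prod.snd).getD d

-- Hand port of str.title() (no PySem primitive): a cased character starting a run is uppercased, later characters
-- of the run lowercased, uncased characters reset the run. Exact on the ASCII domain, where 'cased' = letter.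
def pvTitleChars : List Char → Bool → List Char
  | [], _ => []
  | c :: cs, prevCased =>
    if PySem.Chars.isalpha c then
      (if prevCased then PySem.Chars.lowerChar c else PySem.Chars.upperChar c) :: pvTitleChars cs true
    else c :: pvTitleChars cs false

def pvTitle (s : String) : String := String.ofList (pvTitleChars s.toList false)

-- ===== PORT A =====
def humanize_predicate_py (predicate : String) : String :=
  pvTitle (PySem.Str.replace predicate "_" " ")

def render_entity_bullets_py (facts : List (List (String × String))) : String :=
  -- by_subject = defaultdict(list); for f in facts: by_subject[f.get("subject","Unknown")].append(f)
  let by_subject : PySem.Dict String (List (List (String × String))) :=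
    facts.foldl (fun d f => d.modify (pvGetStr f "subject" "Unknown") [] (fun g => g ++ [f])) PySem.Dict.empty
  let lines : List String :=
    by_subject.items.foldl (fun lines sg =>
      let lines := if 1 < by_subject.size then lines ++ ["**" ++ sg.1 ++ "**"] else lines
      let lines := sg.2.foldl (fun ls f =>
        ls ++ ["- **" ++ humanize_predicate_py (pvGetStr f "predicate" "") ++ "**: " ++ pvGetStr f "value" ""]) lines
      if 1 < by_subject.size then lines ++ [""] else lines) []
  PySem.Str.rstrip (PySem.Str.join "\n" lines)

-- ===== PORT B =====
def pvBulletLine (f : List (String × String)) : String :=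
  "- **" ++ pvTitle (PySem.Str.replace (pvGetStr f "predicate" "") "_" " ") ++ "**: " ++ pvGetStr f "value" ""

def render_entity_bullets_py_alt (facts : List (List (String × String))) : String :=
  -- subjects = []; for f in facts: if s not in subjects: subjects.append(s)
  let subjects : List String :=
    facts.foldl (fun acc f =>
      let s := pvGetStr f "subject" "Unknown"
      if acc.contains s then acc else acc ++ [s]) []
  let multi := 1 < subjects.length
  -- for s in subjects: filter this subject's bullets out of facts, join into one block
  let blocks : List String :=
    subjects.foldl (fun bs s =>
      let lines := if multi then ["**" ++ s ++ "**"] else []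
      let lines := facts.foldl (fun ls f =>
        if pvGetStr f "subject" "Unknown" == s then ls ++ [pvBulletLine f] else ls) lines
      bs ++ [PySem.Str.join "\n" lines]) []
  PySem.Str.rstrip (PySem.Str.join (if multi then "\n\n" else "\n") blocks)

-- ===== PRECONDITION & SPEC =====
def Spec_render_entity_bullets_py (facts : List (List (String × String))) (out : String) : Prop := out = render_entity_bullets_py_alt facts
instance (facts : List (List (String × String))) (out : String) : Decidable (Spec_render_entity_bullets_py facts out) := by unfold Spec_render_entity_bullets_py; infer_instance

-- ===== CLAIM (what is proved, stated in full; the proofs are below) =====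
def Claim_equal_render_entity_bullets_py : Prop := ∀ (facts : List (List (String × String))), Dom_render_entity_bullets_py facts → Spec_render_entity_bullets_py facts (render_entity_bullets_py facts)

-- ===== LEMMAS AND PROOFS =====

-- first-seen distinct subjects, and the group of each subject (the data both ports traverse)
def pvKeys (facts : List (List (String × String))) : List String :=
  PySem.Set.update ([] : PySem.Set String) (facts.map (fun f => pvGetStr f "subject" "Unknown"))

def pvGroup (facts : List (List (String × String))) (c : String) : List (List (String × String)) :=
  facts.filter (fun f => pvGetStr f "subject" "Unknown" == c)

lemma pvBulletLine_eq (f : List (String × String)) :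
    "- **" ++ humanize_predicate_py (pvGetStr f "predicate" "") ++ "**: " ++ pvGetStr f "value" ""
      = pvBulletLine f := rfl

-- B's first loop computes exactly pvKeys
lemma pvB_subjects (facts : List (List (String × String))) :
    facts.foldl (fun acc f =>
        let s := pvGetStr f "subject" "Unknown"
        if acc.contains s then acc else acc ++ [s]) []
      = pvKeys facts := by
  unfold pvKeys
  rw [PySem.Set.update, List.foldl_map]
  rfl

lemma pvA_items (facts : List (List (String × String))) :
    (facts.foldl (fun d f => d.modify (pvGetStr f "subject" "Unknown") [] (fun g => g ++ [f]))
        (PySem.Dict.empty : PySem.Dict String (List (List (String × String))))).items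
      = (pvKeys facts).map (fun c => (c, pvGroup facts c)) := by
  have h : facts.foldl (fun d f => d.modify (pvGetStr f "subject" "Unknown") [] (fun g => g ++ [f]))
        (PySem.Dict.empty : PySem.Dict String (List (List (String × String))))
      = (facts.map (fun f => (pvGetStr f "subject" "Unknown", f))).foldl
          (fun d p => d.modify p.1 [] (fun g => g ++ [p.2])) PySem.Dict.empty := by
    rw [List.foldl_map]
  have hnd : ((facts.map (fun f => (pvGetStr f "subject" "Unknown", f))).foldl
        (fun d p => d.modify p.1 [] (fun g => g ++ [p.2])) PySem.Dict.empty).keys.Nodup :=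
    PySem.Dict.nodup_keys_foldl_modify_key (facts.map (fun f => (pvGetStr f "subject" "Unknown", f)))
      (fun p => p.1) [] (fun _ p g => g ++ [p.2])
      PySem.Dict.empty (by rw [PySem.Dict.keys_empty]; simp)
  have h2 : ((facts.map (fun f => (pvGetStr f "subject" "Unknown", f))).foldl
        (fun d p => d.modify p.1 [] (fun g => g ++ [p.2])) PySem.Dict.empty).keys = pvKeys facts :=
    (PySem.Dict.keys_foldl_modify_key (facts.map (fun f => (pvGetStr f "subject" "Unknown", f)))
      (fun p => p.1) [] (fun _ p g => g ++ [p.2])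
      PySem.Dict.empty).trans (by rw [List.map_map]; rfl)
  rw [h, PySem.Dict.items_eq_map_keys _ hnd [], h2]
  refine List.map_congr_left ?_
  intro c _
  rw [PySem.Dict.getD_foldl_modify_append, PySem.Dict.getD_empty, List.nil_append,
    List.filter_map, List.map_map]
  simp [Function.comp_def, pvGroup]

-- A's outer loop (with the multi-subject branches taken) produces header/bullets/sentinel blocks, flattened
lemma pvA_fold_multi (items : List (String × List (List (String × String)))) (acc : List String) :
    items.foldl (fun lines sg =>
        (sg.2.foldl (fun ls f => ls ++ [pvBulletLine f]) (lines ++ ["**" ++ sg.1 ++ "**"])) ++ [""]) acc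
      = acc ++ items.flatMap (fun sg => ("**" ++ sg.1 ++ "**") :: (sg.2.map pvBulletLine ++ [""])) := by
  induction items generalizing acc with
  | nil => simp
  | cons x xs ih =>
    simp only [List.foldl_cons]
    rw [PySem.List.foldl_append_singleton_eq_map, ih, List.flatMap_cons]
    simp [List.append_assoc]

lemma pv_intercalate_cons (sep a : List Char) (l : List (List Char)) (h : l ≠ []) :
    List.intercalate sep (a :: l) = a ++ sep ++ List.intercalate sep l := by
  cases l with
  | nil => exact absurd rfl h
  | cons b t => simp [List.intercalate, List.intersperse]

lemma pv_intercalate_append (sep : List Char) (xs ys : List (List Char)) (hx : xs ≠ []) (hy : ys ≠ []) :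
    List.intercalate sep (xs ++ ys) = List.intercalate sep xs ++ sep ++ List.intercalate sep ys := by
  induction xs with
  | nil => exact absurd rfl hx
  | cons a xs ih =>
    cases xs with
    | nil =>
      rw [List.singleton_append, pv_intercalate_cons sep a ys hy]
      simp [List.intercalate]
    | cons b t =>
      rw [List.cons_append, pv_intercalate_cons sep a ((b :: t) ++ ys) (by simp),
        pv_intercalate_cons sep a (b :: t) (by simp), ih (by simp)]
      simp [List.append_assoc]

-- joining flattened blocks (with empty-line sentinels) = joining pre-joined blocks with a blank line, plus a trailing '\n'
lemma pv_join_blocks {α : Type} (L : List α) (cb : α → List (List Char)) (hne : L ≠ [])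
    (h : ∀ c, cb c ≠ []) :
    PySem.Chars.join ['\n'] (L.flatMap (fun c => cb c ++ [[]]))
      = PySem.Chars.join ['\n', '\n'] (L.map (fun c => PySem.Chars.join ['\n'] (cb c))) ++ ['\n'] := by
  induction L with
  | nil => exact absurd rfl hne
  | cons c L ih =>
    cases L with
    | nil =>
      simp only [List.flatMap_cons, List.flatMap_nil, List.append_nil, List.map_cons, List.map_nil,
        PySem.Chars.join]
      rw [pv_intercalate_append ['\n'] (cb c) [[]] (h c) (by simp)]
      simp [List.intercalate]
    | cons c' L' =>
      have hmapne : (c' :: L').map (fun c => List.intercalate ['\n'] (cb c)) ≠ [] := by simp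
      have hfm : (c' :: L').flatMap (fun c => cb c ++ [[]]) ≠ [] := by
        simp [List.append_eq_nil_iff]
      have hnil : List.intercalate ['\n'] [([] : List Char)] = [] := by
        simp [List.intercalate]
      have ih' := ih (by simp)
      simp only [PySem.Chars.join] at ih' ⊢
      calc List.intercalate ['\n'] ((c :: c' :: L').flatMap (fun c => cb c ++ [[]]))
          = List.intercalate ['\n'] ((cb c ++ [[]]) ++ (c' :: L').flatMap (fun c => cb c ++ [[]])) := by
            rw [List.flatMap_cons]
        _ = List.intercalate ['\n'] (cb c ++ [[]]) ++ ['\n']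
              ++ List.intercalate ['\n'] ((c' :: L').flatMap (fun c => cb c ++ [[]])) :=
            pv_intercalate_append ['\n'] _ _ (by simp) hfm
        _ = (List.intercalate ['\n'] (cb c) ++ ['\n'] ++ List.intercalate ['\n'] [[]]) ++ ['\n']
              ++ (List.intercalate ['\n', '\n'] ((c' :: L').map (fun c => List.intercalate ['\n'] (cb c))) ++ ['\n']) := by
            rw [pv_intercalate_append ['\n'] (cb c) [[]] (h c) (by simp), ih']
        _ = List.intercalate ['\n', '\n'] ((c :: c' :: L').map (fun c => List.intercalate ['\n'] (cb c))) ++ ['\n'] := by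
            rw [hnil,
              show (c :: c' :: L').map (fun c => List.intercalate ['\n'] (cb c))
                  = List.intercalate ['\n'] (cb c)
                    :: (c' :: L').map (fun c => List.intercalate ['\n'] (cb c)) from rfl,
              pv_intercalate_cons ['\n', '\n'] (List.intercalate ['\n'] (cb c))
                ((c' :: L').map (fun c => List.intercalate ['\n'] (cb c))) hmapne]
            simp [List.append_assoc]

lemma pv_rstrip_newline (cs : List Char) :
    PySem.Chars.rstrip (cs ++ ['\n']) = PySem.Chars.rstrip cs := by
  simp [PySem.Chars.rstrip, PySem.Chars.isspace]

lemma pv_join_singleton (s x : String) : PySem.Str.join s [x] = x := by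
  simp [PySem.Str.join, PySem.Chars.join, List.intercalate]

-- the whole multi-subject rendering: A's flat join vs B's block join agree after rstrip
lemma pv_multi_join {α : Type} (L : List α) (blkf : α → List String) (hne : L ≠ [])
    (h : ∀ c, blkf c ≠ []) :
    PySem.Str.rstrip (PySem.Str.join "\n" (L.flatMap (fun c => blkf c ++ [""])))
      = PySem.Str.rstrip (PySem.Str.join "\n\n" (L.map (fun c => PySem.Str.join "\n" (blkf c)))) := by
  have hs : ("\n" : String).toList = ['\n'] := rfl
  have hs2 : ("\n\n" : String).toList = ['\n', '\n'] := rfl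
  have h0 : ("" : String).toList = [] := rfl
  simp only [PySem.Str.rstrip, PySem.Str.join, hs, hs2, String.toList_ofList, List.map_map,
    Function.comp_def]
  refine congrArg String.ofList ?_
  rw [List.map_flatMap]
  have hl : L.flatMap (fun c => (blkf c ++ [""]).map String.toList)
      = L.flatMap (fun c => (blkf c).map String.toList ++ [[]]) := by
    simp [List.map_append, h0]
  rw [hl]
  rw [pv_join_blocks L (fun c => (blkf c).map String.toList) hne
    (fun c => by simpa using h c)]
  rw [pv_rstrip_newline]

-- B's inner filter loop over facts = the subject's group, bulleted
lemma pvB_inner (facts : List (List (String × String))) (s : String) (acc : List String) :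
    facts.foldl (fun ls f =>
        if pvGetStr f "subject" "Unknown" == s then ls ++ [pvBulletLine f] else ls) acc
      = acc ++ (pvGroup facts s).map pvBulletLine := by
  rw [pvGroup, PySem.List.foldl_append_if]

-- B's outer loop: one block string per subject, collected in order
lemma pvB_blocks (facts : List (List (String × String))) (subs : List String)
    (hdr : String → List String) (acc : List String) :
    subs.foldl (fun bs s => bs ++ [PySem.Str.join "\n"
        (facts.foldl (fun ls f =>
          if pvGetStr f "subject" "Unknown" == s then ls ++ [pvBulletLine f] else ls) (hdr s))]) acc
      = acc ++ subs.map (fun s => PySem.Str.join "\n" (hdr s ++ (pvGroup facts s).map pvBulletLine)) := by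
  simp only [pvB_inner]
  exact PySem.List.foldl_append_singleton_eq_map _ _ _

-- ===== VERDICT (by name: the statement is the Claim_ definition above) =====
theorem render_entity_bullets_py_spec : Claim_equal_render_entity_bullets_py := by
  intro facts _
  unfold Spec_render_entity_bullets_py
  simp only [render_entity_bullets_py, render_entity_bullets_py_alt, pvA_items, pvB_subjects,
    PySem.Dict.size, List.length_map, pvBulletLine_eq]
  rw [pvB_blocks facts (pvKeys facts) _ []]
  simp only [List.nil_append]
  by_cases hm : 1 < (pvKeys facts).length
  · simp only [hm, if_true]
    rw [pvA_fold_multi, List.nil_append, List.flatMap_map]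
    exact pv_multi_join (pvKeys facts)
      (fun c => ("**" ++ c ++ "**") :: (pvGroup facts c).map pvBulletLine)
      (by intro hcontra; rw [hcontra] at hm; simp at hm)
      (fun c => by simp)
  · simp only [hm, if_false]
    rcases hL : pvKeys facts with _ | ⟨c, L'⟩
    · rfl
    · rcases L' with _ | ⟨c', L''⟩
      · simp only [List.map_cons, List.map_nil, List.foldl_cons, List.foldl_nil]
        rw [PySem.List.foldl_append_singleton_eq_map, List.nil_append, pv_join_singleton]
      · rw [hL] at hm; simp at hm
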